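-- pv_equiv track=rewrite | github.com/roby2358/mcp-wrappers | bash/bash.py | contains_shell_operators
-- ===== SOURCE A (Python) =====
-- def contains_shell_operators(command: str) -> bool:
--     """Check if the command contains shell operators that could be used for command injection."""
--     # List of shell operators and other dangerous patterns
--     shell_operators = [
--         "&&", "||", ";", "|", ">", ">>", "<", "<<",
--         "`", "$", "$(", "${", "&", "#!", "eval", "exec"
--     ]
--
--     for operator in shell_operators:
--         if operator in command:
--             return True
--
--     return False
-- ===== SOURCE B (Python) =====
-- def contains_shell_operators(command: str) -> bool:
--     """Check if the command contains shell operators that could be used for command injection."""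
--     # Single left-to-right scan: a character class covers every single-char operator
--     # (which also subsumes the doubled ones like "&&", ">>", "$("), plus a bounded
--     # lookahead for the multi-character patterns "#!", "eval", "exec".
--     danger = ";|><`$&"
--     n = len(command)
--     for i in range(n):
--         c = command[i]
--         if c in danger:
--             return True
--         if c == '#' and i + 1 < n and command[i + 1] == '!':
--             return True
--         if c == 'e' and command[i + 1:i + 4] in ("val", "xec"):
--             return True
--     return False
-- ===== Notes on version B (the rewrite author's own statement) =====
-- stated objective: alternative
-- what changed: B makes a single left-to-right pass over the command, testing each character against a seven-character danger class (which subsumes the doubled two-character operators) with a bounded three-character lookahead for the remaining multi-character patterns, instead of A's sixteen separate full substring scans.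
import Mathlib
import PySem

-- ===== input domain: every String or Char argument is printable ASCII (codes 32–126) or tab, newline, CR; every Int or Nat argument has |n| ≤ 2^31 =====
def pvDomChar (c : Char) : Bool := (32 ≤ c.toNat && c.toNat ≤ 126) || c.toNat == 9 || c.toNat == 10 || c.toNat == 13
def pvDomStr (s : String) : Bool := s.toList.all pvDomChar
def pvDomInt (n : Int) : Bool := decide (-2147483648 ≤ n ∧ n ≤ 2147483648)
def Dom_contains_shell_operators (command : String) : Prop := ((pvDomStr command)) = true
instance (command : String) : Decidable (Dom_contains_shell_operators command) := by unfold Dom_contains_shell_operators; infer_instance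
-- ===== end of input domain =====

-- B replaces A's sixteen separate substring scans by one left-to-right pass with a
-- single-character danger class plus bounded lookahead for "#!", "eval", "exec" (objective: alternative).


-- ===== PORT A =====
-- the literal 'shell_operators' list of A
def pvShellOperators : List String :=
  ["&&", "||", ";", "|", ">", ">>", "<", "<<",
   "`", "$", "$(", "${", "&", "#!", "eval", "exec"]

-- 'for operator in shell_operators: if operator in command: return True' then 'return False'
def pvOpLoop (command : String) : List String → Bool
  | [] => false
  | op :: rest => if PySem.Str.isIn op command then true else pvOpLoop command rest

def contains_shell_operators (command : String) : Bool :=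
  pvOpLoop command pvShellOperators

-- ===== PORT B =====
-- B's 'danger' character class (single-character 'c in danger' is char membership)
def pvDanger : List Char := [';', '|', '>', '<', '`', '$', '&']

-- B's single pass: 'for i in range(n)' with lookahead command[i+1] / command[i+1:i+4];
-- on the cons cell, 'rest' is exactly command[i+1:], so the slices are 'rest.take 1' / 'rest.take 3'
def pvScan : List Char → Bool
  | [] => false
  | c :: rest =>
    if c ∈ pvDanger then true
    else if c = '#' ∧ rest.take 1 = ['!'] then true
    else if c = 'e' ∧ (rest.take 3 = ['v', 'a', 'l'] ∨ rest.take 3 = ['x', 'e', 'c']) then true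
    else pvScan rest

def contains_shell_operators_alt (command : String) : Bool :=
  pvScan command.toList

-- ===== PRECONDITION & SPEC =====
def Spec_contains_shell_operators (command : String) (out : Bool) : Prop := out = contains_shell_operators_alt command
instance (command : String) (out : Bool) : Decidable (Spec_contains_shell_operators command out) := by unfold Spec_contains_shell_operators; infer_instance

-- ===== CLAIM (what is proved, stated in full; the proofs are below) =====
def Claim_equal_contains_shell_operators : Prop := ∀ (command : String), Dom_contains_shell_operators command → Spec_contains_shell_operators command (contains_shell_operators command)

-- ===== LEMMAS AND PROOFS =====

-- common characterisation: some dangerous single char occurs, or "#!", "eval" or "exec" is an infix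
def pvHit (cs : List Char) : Prop :=
  (∃ c ∈ cs, c ∈ pvDanger) ∨ ['#', '!'] <:+: cs ∨ ['e', 'v', 'a', 'l'] <:+: cs ∨ ['e', 'x', 'e', 'c'] <:+: cs

lemma pvOpLoop_iff (cmd : String) (ops : List String) :
    pvOpLoop cmd ops = true ↔ ∃ op ∈ ops, op.toList <:+: cmd.toList := by
  induction ops with
  | nil => simp [pvOpLoop]
  | cons op rest ih =>
    cases hb : PySem.Str.isIn op cmd with
    | true =>
      have hin := (PySem.Str.isIn_iff_infix op cmd).mp hb
      simp only [pvOpLoop, hb]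
      exact iff_of_true (by simp) ⟨op, by simp, hin⟩
    | false =>
      have hni : ¬op.toList <:+: cmd.toList := fun hc => by
        rw [(PySem.Str.isIn_iff_infix op cmd).mpr hc] at hb
        exact absurd hb (by decide)
      simp only [pvOpLoop, hb, Bool.false_eq_true, if_false]
      rw [ih, List.exists_mem_cons_iff]
      exact ⟨fun h => Or.inr h, fun h => h.resolve_left hni⟩

lemma A_iff (cmd : String) : contains_shell_operators cmd = true ↔ pvHit cmd.toList := by
  rw [show contains_shell_operators cmd = pvOpLoop cmd pvShellOperators from rfl, pvOpLoop_iff]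
  constructor
  · rintro ⟨op, hop, h⟩
    have hcase : op = "&&" ∨ op = "||" ∨ op = ";" ∨ op = "|" ∨ op = ">" ∨ op = ">>" ∨
        op = "<" ∨ op = "<<" ∨ op = "`" ∨ op = "$" ∨ op = "$(" ∨ op = "${" ∨
        op = "&" ∨ op = "#!" ∨ op = "eval" ∨ op = "exec" := by
      simpa [pvShellOperators] using hop
    rcases hcase with rfl | rfl | rfl | rfl | rfl | rfl | rfl | rfl | rfl | rfl | rfl | rfl | rfl | rfl | rfl | rfl
    · exact Or.inl ⟨'&', h.subset (by decide), by decide⟩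
    · exact Or.inl ⟨'|', h.subset (by decide), by decide⟩
    · exact Or.inl ⟨';', (List.singleton_infix_iff ';' cmd.toList).mp h, by decide⟩
    · exact Or.inl ⟨'|', (List.singleton_infix_iff '|' cmd.toList).mp h, by decide⟩
    · exact Or.inl ⟨'>', (List.singleton_infix_iff '>' cmd.toList).mp h, by decide⟩
    · exact Or.inl ⟨'>', h.subset (by decide), by decide⟩
    · exact Or.inl ⟨'<', (List.singleton_infix_iff '<' cmd.toList).mp h, by decide⟩
    · exact Or.inl ⟨'<', h.subset (by decide), by decide⟩
    · exact Or.inl ⟨'`', (List.singleton_infix_iff '`' cmd.toList).mp h, by decide⟩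
    · exact Or.inl ⟨'$', (List.singleton_infix_iff '$' cmd.toList).mp h, by decide⟩
    · exact Or.inl ⟨'$', h.subset (by decide), by decide⟩
    · exact Or.inl ⟨'$', h.subset (by decide), by decide⟩
    · exact Or.inl ⟨'&', (List.singleton_infix_iff '&' cmd.toList).mp h, by decide⟩
    · exact Or.inr (Or.inl h)
    · exact Or.inr (Or.inr (Or.inl h))
    · exact Or.inr (Or.inr (Or.inr h))
  · rintro (⟨c, hcm, hcd⟩ | h | h | h)
    · have hc : c = ';' ∨ c = '|' ∨ c = '>' ∨ c = '<' ∨ c = '`' ∨ c = '$' ∨ c = '&' := by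
        simpa [pvDanger] using hcd
      rcases hc with rfl | rfl | rfl | rfl | rfl | rfl | rfl
      · exact ⟨";", by decide, (List.singleton_infix_iff ';' cmd.toList).mpr hcm⟩
      · exact ⟨"|", by decide, (List.singleton_infix_iff '|' cmd.toList).mpr hcm⟩
      · exact ⟨">", by decide, (List.singleton_infix_iff '>' cmd.toList).mpr hcm⟩
      · exact ⟨"<", by decide, (List.singleton_infix_iff '<' cmd.toList).mpr hcm⟩
      · exact ⟨"`", by decide, (List.singleton_infix_iff '`' cmd.toList).mpr hcm⟩
      · exact ⟨"$", by decide, (List.singleton_infix_iff '$' cmd.toList).mpr hcm⟩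
      · exact ⟨"&", by decide, (List.singleton_infix_iff '&' cmd.toList).mpr hcm⟩
    · exact ⟨"#!", by decide, h⟩
    · exact ⟨"eval", by decide, h⟩
    · exact ⟨"exec", by decide, h⟩

lemma pvHit_cons (c : Char) (rest : List Char) :
    pvHit (c :: rest) ↔
      ((c ∈ pvDanger ∨ (c = '#' ∧ rest.take 1 = ['!']) ∨
        (c = 'e' ∧ (rest.take 3 = ['v', 'a', 'l'] ∨ rest.take 3 = ['x', 'e', 'c']))) ∨ pvHit rest) := by
  have hp : ∀ (l r : List Char), l <+: r ↔ r.take l.length = l := by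
    intro l r; rw [List.prefix_iff_eq_take, eq_comm]
  simp only [pvHit, List.exists_mem_cons_iff, List.infix_cons_iff, List.cons_prefix_cons]
  simp only [hp]
  simp only [List.length_cons, List.length_nil]
  constructor
  · rintro ((hc | he) | (⟨rfl, hr⟩ | hi) | (⟨rfl, hr⟩ | hi) | (⟨rfl, hr⟩ | hi))
    · exact Or.inl (Or.inl hc)
    · exact Or.inr (Or.inl he)
    · exact Or.inl (Or.inr (Or.inl ⟨rfl, hr⟩))
    · exact Or.inr (Or.inr (Or.inl hi))
    · exact Or.inl (Or.inr (Or.inr ⟨rfl, Or.inl hr⟩))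
    · exact Or.inr (Or.inr (Or.inr (Or.inl hi)))
    · exact Or.inl (Or.inr (Or.inr ⟨rfl, Or.inr hr⟩))
    · exact Or.inr (Or.inr (Or.inr (Or.inr hi)))
  · rintro ((hc | ⟨rfl, hr⟩ | ⟨rfl, (hr | hr)⟩) | (he | hi | hi | hi))
    · exact Or.inl (Or.inl hc)
    · exact Or.inr (Or.inl (Or.inl ⟨rfl, hr⟩))
    · exact Or.inr (Or.inr (Or.inl (Or.inl ⟨rfl, hr⟩)))
    · exact Or.inr (Or.inr (Or.inr (Or.inl ⟨rfl, hr⟩)))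
    · exact Or.inl (Or.inr he)
    · exact Or.inr (Or.inl (Or.inr hi))
    · exact Or.inr (Or.inr (Or.inl (Or.inr hi)))
    · exact Or.inr (Or.inr (Or.inr (Or.inr hi)))

lemma pvScan_iff (cs : List Char) : pvScan cs = true ↔ pvHit cs := by
  induction cs with
  | nil => simp [pvScan, pvHit]
  | cons c rest ih =>
    rw [pvHit_cons, ← ih]
    simp only [pvScan]
    split_ifs with h1 h2 h3
    · simp [h1]
    · simp [h2]
    · simp [h3]
    · simp [h1, h2, h3]

-- ===== VERDICT (by name: the statement is the Claim_ definition above) =====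
theorem contains_shell_operators_spec : Claim_equal_contains_shell_operators := by
  unfold Claim_equal_contains_shell_operators
  intro command _
  unfold Spec_contains_shell_operators contains_shell_operators_alt
  exact Bool.eq_iff_iff.mpr ((A_iff command).trans (pvScan_iff command.toList).symm)
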